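-- pv_equiv track=rewrite | github.com/kaxixi/proactive-assistant | memory.py | _tags_overlap
-- ===== SOURCE A (Python) =====
-- def _tags_overlap(tags_a: list, tags_b: list) -> bool:
--     """Check if two tag lists share any person: tags or 2+ general tags."""
--     set_a = set(tags_a)
--     set_b = set(tags_b)
--     # Any shared person tag is a strong match
--     person_overlap = {t for t in set_a & set_b if t.startswith("person:")}
--     if person_overlap:
--         return True
--     # 2+ shared general tags is a weaker match
--     general_overlap = set_a & set_b - {t for t in set_a | set_b if t.startswith("person:")}
--     return len(general_overlap) >= 2
-- ===== SOURCE B (Python) =====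
-- def _tags_overlap(tags_a: list, tags_b: list) -> bool:
--     """Check if two tag lists share any person: tags or 2+ general tags."""
--     xs = sorted(set(tags_a))
--     ys = sorted(set(tags_b))
--     i = j = shared = 0
--     while i < len(xs) and j < len(ys):
--         if xs[i] < ys[j]:
--             i += 1
--         elif ys[j] < xs[i]:
--             j += 1
--         else:
--             if xs[i].startswith("person:"):
--                 return True
--             shared += 1
--             i += 1
--             j += 1
--     return shared >= 2
-- ===== Notes on version B (the rewrite author's own statement) =====
-- stated objective: alternative
-- what changed: Replaces A's hash-set algebra (two sets, a person comprehension, a union/difference/intersection expression) with a sort-then-merge algorithm: the distinct tags of each list are sorted and intersected by a two-pointer merge scan that early-returns on a shared person tag and otherwise counts shared general tags.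
import Mathlib
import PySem

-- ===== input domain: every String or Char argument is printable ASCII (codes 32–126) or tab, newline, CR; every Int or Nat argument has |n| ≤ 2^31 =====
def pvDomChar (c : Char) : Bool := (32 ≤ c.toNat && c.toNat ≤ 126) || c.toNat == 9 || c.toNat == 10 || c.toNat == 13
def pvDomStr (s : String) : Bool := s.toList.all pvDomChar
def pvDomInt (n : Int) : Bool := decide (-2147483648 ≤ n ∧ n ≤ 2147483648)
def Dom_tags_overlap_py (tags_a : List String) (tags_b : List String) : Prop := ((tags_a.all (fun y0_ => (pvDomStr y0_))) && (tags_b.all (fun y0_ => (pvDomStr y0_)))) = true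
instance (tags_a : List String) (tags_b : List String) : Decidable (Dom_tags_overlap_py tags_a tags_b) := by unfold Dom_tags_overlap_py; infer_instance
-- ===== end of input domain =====

-- B replaces A's hash-set algebra with a sort-then-merge two-pointer intersection scan (alternative algorithm; no speed claim).

-- ===== PORT A =====
def tags_overlap_py (tags_a : List String) (tags_b : List String) : Bool :=
  let set_a : PySem.Set String := PySem.Set.ofList tags_a
  let set_b : PySem.Set String := PySem.Set.ofList tags_b
  -- {t for t in set_a & set_b if t.startswith("person:")}
  let person_overlap : PySem.Set String :=
    (PySem.Set.inter set_a set_b).filter (fun t => PySem.Str.startswith t "person:")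
  if !person_overlap.isEmpty then true
  else
    -- set_a & (set_b - {t for t in set_a | set_b if t.startswith("person:")})  (Python precedence: '-' binds tighter than '&')
    let general_overlap : PySem.Set String :=
      PySem.Set.inter set_a (PySem.Set.diff set_b
        ((PySem.Set.union set_a set_b).filter (fun t => PySem.Str.startswith t "person:")))
    decide (general_overlap.length ≥ 2)

-- ===== PORT B =====
-- Source B's while loop: two pointers into the sorted distinct-tag lists, counter `shared`
def tagsSortedMerge : List String → List String → Nat → Bool
  | [], _, shared => decide (shared ≥ 2)
  | _ :: _, [], shared => decide (shared ≥ 2)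
  | x :: xs, y :: ys, shared =>
    if x < y then tagsSortedMerge xs (y :: ys) shared
    else if y < x then tagsSortedMerge (x :: xs) ys shared
    else if PySem.Str.startswith x "person:" then true
    else tagsSortedMerge xs ys (shared + 1)
termination_by xs ys _ => xs.length + ys.length

def tags_overlap_py_alt (tags_a : List String) (tags_b : List String) : Bool :=
  tagsSortedMerge
    (PySem.List.sorted (PySem.Set.ofList tags_a) (fun t => t) false)
    (PySem.List.sorted (PySem.Set.ofList tags_b) (fun t => t) false) 0

-- ===== PRECONDITION & SPEC =====
def Spec_tags_overlap_py (tags_a : List String) (tags_b : List String) (out : Bool) : Prop := out = tags_overlap_py_alt tags_a tags_b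
instance (tags_a : List String) (tags_b : List String) (out : Bool) : Decidable (Spec_tags_overlap_py tags_a tags_b out) := by unfold Spec_tags_overlap_py; infer_instance

-- ===== CLAIM (what is proved, stated in full; the proofs are below) =====
def Claim_equal_tags_overlap_py : Prop := ∀ (tags_a : List String) (tags_b : List String), Dom_tags_overlap_py tags_a tags_b → Spec_tags_overlap_py tags_a tags_b (tags_overlap_py tags_a tags_b)

-- ===== LEMMAS AND PROOFS =====

-- Closed form of the merge scan on strictly sorted lists: it returns early True iff some
-- element of xs lies in ys and is a person tag, else it tests shared + #(shared general) ≥ 2.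
theorem tagsSortedMerge_eq : ∀ (n : Nat) (xs ys : List String) (shared : Nat),
    xs.length + ys.length ≤ n →
    xs.Pairwise (· < ·) → ys.Pairwise (· < ·) →
    tagsSortedMerge xs ys shared =
      (xs.any (fun t => decide (t ∈ ys) && PySem.Str.startswith t "person:")
        || decide (shared +
            (xs.filter (fun t => decide (t ∈ ys) && !PySem.Str.startswith t "person:")).length ≥ 2)) := by
  intro n
  induction n with
  | zero =>
    intro xs ys shared hn _ _
    have hx : xs = [] := by cases xs <;> simp_all
    subst hx
    simp [tagsSortedMerge]
  | succ n ih =>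
    intro xs ys shared hn hxs hys
    match xs, ys with
    | [], ys => simp [tagsSortedMerge]
    | x :: xs, [] => simp [tagsSortedMerge]
    | x :: xs, y :: ys =>
      have hxs' : xs.Pairwise (· < ·) := hxs.of_cons
      have hys' : ys.Pairwise (· < ·) := hys.of_cons
      have hn0 : xs.length + 1 + (ys.length + 1) ≤ n + 1 := by simpa using hn
      by_cases hlt : x < y
      · -- x < everything in y :: ys, so x ∉ y :: ys
        have hxney : x ≠ y := ne_of_lt hlt
        have hxnys : x ∉ ys := fun h =>
          absurd rfl (ne_of_lt (lt_trans hlt (List.rel_of_pairwise_cons hys h)))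
        rw [show tagsSortedMerge (x :: xs) (y :: ys) shared
            = tagsSortedMerge xs (y :: ys) shared from by
          rw [tagsSortedMerge]; simp [hlt]]
        rw [ih xs (y :: ys) shared (by simp only [List.length_cons]; omega) hxs' hys]
        simp [hxney, hxnys]
      · by_cases hgt : y < x
        · -- y < everything in x :: xs, so membership in y :: ys reduces to ys throughout
          have hne : ∀ t ∈ x :: xs,
              (decide (t ∈ y :: ys) : Bool) = decide (t ∈ ys) := by
            intro t ht
            have hyt : y < t := by
              rcases List.mem_cons.mp ht with h | h
              · simpa [h] using hgt
              · exact lt_trans hgt (List.rel_of_pairwise_cons hxs h)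
            apply decide_eq_decide.mpr
            simp [List.mem_cons, (ne_of_lt hyt).symm]
          rw [show tagsSortedMerge (x :: xs) (y :: ys) shared
              = tagsSortedMerge (x :: xs) ys shared from by
            rw [tagsSortedMerge]; simp [hlt, hgt]]
          rw [ih (x :: xs) ys shared (by simp only [List.length_cons]; omega) hxs hys']
          rw [show (x :: xs).any
                (fun t => decide (t ∈ y :: ys) && PySem.Str.startswith t "person:")
              = (x :: xs).any
                (fun t => decide (t ∈ ys) && PySem.Str.startswith t "person:") from
            PySem.List.any_congr_mem (fun t ht => by rw [hne t ht])]
          rw [show (x :: xs).filter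
                (fun t => decide (t ∈ y :: ys) && !PySem.Str.startswith t "person:")
              = (x :: xs).filter
                (fun t => decide (t ∈ ys) && !PySem.Str.startswith t "person:") from
            List.filter_congr (fun t ht => by rw [hne t ht])]
        · -- x = y : a shared tag
          have heq : x = y := le_antisymm (not_lt.mp hgt) (not_lt.mp hlt)
          subst heq
          have hne : ∀ t ∈ xs,
              (decide (t ∈ x :: ys) : Bool) = decide (t ∈ ys) := by
            intro t ht
            have hxt : x < t := List.rel_of_pairwise_cons hxs ht
            apply decide_eq_decide.mpr
            simp [List.mem_cons, (ne_of_lt hxt).symm]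
          by_cases hp : PySem.Str.startswith x "person:" = true
          · have hp2 : PySem.Chars.startswith x.toList
                ['p','e','r','s','o','n',':'] = true := hp
            rw [show tagsSortedMerge (x :: xs) (x :: ys) shared = true from by
              rw [tagsSortedMerge]; simp [hp2]]
            symm
            rw [List.any_cons,
              show (decide (x ∈ x :: ys) && PySem.Str.startswith x "person:") = true from by
                simp [hp2],
              Bool.true_or, Bool.true_or]
          · have hp2' : PySem.Chars.startswith x.toList
                ['p','e','r','s','o','n',':'] = false := Bool.eq_false_iff.mpr hp
            rw [show tagsSortedMerge (x :: xs) (x :: ys) shared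
                = tagsSortedMerge xs ys (shared + 1) from by
              rw [tagsSortedMerge]; simp [hp2']]
            rw [ih xs ys (shared + 1) (by omega) hxs' hys']
            rw [List.any_cons,
              show (decide (x ∈ x :: ys) && PySem.Str.startswith x "person:") = false from by
                simp [hp2'],
              Bool.false_or]
            rw [show xs.any (fun t => decide (t ∈ x :: ys) && PySem.Str.startswith t "person:")
                = xs.any (fun t => decide (t ∈ ys) && PySem.Str.startswith t "person:") from
              PySem.List.any_congr_mem (fun t ht => by rw [hne t ht])]
            rw [List.filter_cons,
              show (decide (x ∈ x :: ys) && !PySem.Str.startswith x "person:") = true from by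
                simp [hp2']]
            rw [if_pos rfl, List.length_cons]
            rw [show xs.filter (fun t => decide (t ∈ x :: ys) && !PySem.Str.startswith t "person:")
                = xs.filter (fun t => decide (t ∈ ys) && !PySem.Str.startswith t "person:") from
              List.filter_congr (fun t ht => by rw [hne t ht])]
            rw [show (decide (shared +
                  ((xs.filter (fun t => decide (t ∈ ys) && !PySem.Str.startswith t "person:")).length + 1) ≥ 2) : Bool)
                = decide (shared + 1 +
                  (xs.filter (fun t => decide (t ∈ ys) && !PySem.Str.startswith t "person:")).length ≥ 2) from by
              apply decide_eq_decide.mpr; omega]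


-- A's person filter is empty iff no tag of tags_a is a shared person tag.
theorem person_filter_empty_iff (tags_a tags_b : List String) :
    (((PySem.Set.inter (PySem.Set.ofList tags_a) (PySem.Set.ofList tags_b)).filter
        (fun t => PySem.Str.startswith t "person:")) = [] ↔
      ((PySem.Set.ofList tags_a).any
        (fun t => decide (t ∈ tags_b) && PySem.Str.startswith t "person:")) = false) := by
  simp only [List.filter_eq_nil_iff, List.any_eq_false, Bool.and_eq_true, not_and,
    PySem.Set.mem_inter, PySem.Set.mem_ofList, decide_eq_true_eq, Bool.not_eq_true]
  constructor
  · intro h t ht hb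
    exact h t ⟨ht, hb⟩
  · intro h t ht
    exact h t ht.1 ht.2

-- A's general-overlap set has the same members (both nodup) as the shared-general filter of set_a.
theorem general_length_eq (tags_a tags_b : List String) :
    (PySem.Set.inter (PySem.Set.ofList tags_a) (PySem.Set.diff (PySem.Set.ofList tags_b)
      ((PySem.Set.union (PySem.Set.ofList tags_a) (PySem.Set.ofList tags_b)).filter
        (fun t => PySem.Str.startswith t "person:")))).length =
    ((PySem.Set.ofList tags_a).filter
      (fun t => decide (t ∈ tags_b) && !PySem.Str.startswith t "person:")).length := by
  apply List.Perm.length_eq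
  rw [List.perm_ext_iff_of_nodup
    (PySem.Set.nodup_inter _ _ (PySem.Set.nodup_ofList _))
    ((PySem.Set.nodup_ofList tags_a).filter _)]
  intro t
  simp only [PySem.Set.mem_inter, PySem.Set.mem_diff, PySem.Set.mem_union, PySem.Set.mem_ofList,
    List.mem_filter, Bool.and_eq_true, decide_eq_true_eq, Bool.not_eq_true,
    Bool.not_eq_true', not_and]
  constructor
  · rintro ⟨ha, hb, hnp⟩
    exact ⟨ha, hb, hnp (Or.inl ha)⟩
  · rintro ⟨ha, hb, hnp⟩
    exact ⟨ha, hb, fun _ => hnp⟩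

-- ===== VERDICT (by name: the statement is the Claim_ definition above) =====
theorem tags_overlap_py_spec : Claim_equal_tags_overlap_py := by
  intro tags_a tags_b _
  unfold Spec_tags_overlap_py tags_overlap_py tags_overlap_py_alt
  have hsa_perm : (PySem.List.sorted (PySem.Set.ofList tags_a) (fun t => t) false).Perm
      (PySem.Set.ofList tags_a) := PySem.List.sorted_perm _ _ _
  have hsb_mem : ∀ t : String,
      t ∈ PySem.List.sorted (PySem.Set.ofList tags_b) (fun t => t) false ↔ t ∈ tags_b := by
    intro t
    rw [PySem.List.mem_sorted, PySem.Set.mem_ofList]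
  have hB := tagsSortedMerge_eq
    ((PySem.List.sorted (PySem.Set.ofList tags_a) (fun t => t) false).length
      + (PySem.List.sorted (PySem.Set.ofList tags_b) (fun t => t) false).length)
    (PySem.List.sorted (PySem.Set.ofList tags_a) (fun t => t) false)
    (PySem.List.sorted (PySem.Set.ofList tags_b) (fun t => t) false) 0 le_rfl
    (PySem.List.sorted_ofList_pairwise_lt tags_a)
    (PySem.List.sorted_ofList_pairwise_lt tags_b)
  show (if !((PySem.Set.inter (PySem.Set.ofList tags_a) (PySem.Set.ofList tags_b)).filter
        (fun t => PySem.Str.startswith t "person:")).isEmpty then true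
      else decide ((PySem.Set.inter (PySem.Set.ofList tags_a) (PySem.Set.diff (PySem.Set.ofList tags_b)
        ((PySem.Set.union (PySem.Set.ofList tags_a) (PySem.Set.ofList tags_b)).filter
          (fun t => PySem.Str.startswith t "person:")))).length ≥ 2))
    = tagsSortedMerge (PySem.List.sorted (PySem.Set.ofList tags_a) (fun t => t) false)
        (PySem.List.sorted (PySem.Set.ofList tags_b) (fun t => t) false) 0
  rw [hB]
  have hpred_any : (PySem.List.sorted (PySem.Set.ofList tags_a) (fun t => t) false).any
        (fun t => decide (t ∈ PySem.List.sorted (PySem.Set.ofList tags_b) (fun t => t) false)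
          && PySem.Str.startswith t "person:")
      = (PySem.Set.ofList tags_a).any
          (fun t => decide (t ∈ tags_b) && PySem.Str.startswith t "person:") := by
    rw [PySem.List.any_congr_mem (fun t _ => by rw [decide_eq_decide.mpr (hsb_mem t)])]
    exact hsa_perm.any_eq
  have hpred_filter : ((PySem.List.sorted (PySem.Set.ofList tags_a) (fun t => t) false).filter
        (fun t => decide (t ∈ PySem.List.sorted (PySem.Set.ofList tags_b) (fun t => t) false)
          && !PySem.Str.startswith t "person:")).length
      = ((PySem.Set.ofList tags_a).filter
          (fun t => decide (t ∈ tags_b) && !PySem.Str.startswith t "person:")).length := by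
    rw [List.filter_congr (fun t _ => by rw [decide_eq_decide.mpr (hsb_mem t)])]
    exact (hsa_perm.filter _).length_eq
  rw [hpred_any, hpred_filter]
  by_cases hp : ((PySem.Set.ofList tags_a).any
      (fun t => decide (t ∈ tags_b) && PySem.Str.startswith t "person:")) = true
  · have hne := (not_iff_not.mpr (person_filter_empty_iff tags_a tags_b)).mpr
      (by intro h; rw [h] at hp; exact Bool.false_ne_true hp)
    rw [hp, if_pos (by
      simp only [Bool.not_eq_true', List.isEmpty_eq_false_iff]; exact hne)]
    rw [Bool.true_or]
  · have hfalse := Bool.eq_false_iff.mpr hp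
    have heq := (person_filter_empty_iff tags_a tags_b).mpr hfalse
    rw [hfalse, if_neg (by
      simp only [Bool.not_eq_true', List.isEmpty_eq_false_iff]; exact fun h2 => h2 heq)]
    rw [Bool.false_or, general_length_eq tags_a tags_b]
    simp
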